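-- pv_equiv track=rewrite | github.com/starfys/ss-advent-solutions | Python/day5/advent5.2.py | is_really_nice
-- ===== SOURCE A (Python) =====
-- def is_really_nice(word):
--     has_duplicate_pair = False
--     has_alternating_sequence = False
--     last_pair = word[0] + word[1]
--     pairs=[last_pair]
--     for index in range(1, len(word) - 1):
--         cur_pair = word[index] + word[index + 1]
--         if cur_pair in pairs:
--             if cur_pair != last_pair:
--                 has_duplicate_pair = True
--                 dup_pair = cur_pair
--         else:
--             pairs.append(cur_pair)
--         if last_pair != cur_pair:
--             last_pair = cur_pair
--         else:
--             last_pair = ''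
--         if word[index - 1] == word[index + 1]:
--             has_alternating_sequence = True
--             alt_seq = word[index - 1:index + 2]
--     return has_duplicate_pair and has_alternating_sequence
-- ===== SOURCE B (Python) =====
-- def is_really_nice(word):
--     # Memoryless brute force: a word is nice iff some adjacent pair recurs at
--     # least two positions later, and some letter repeats with one letter between.
--     pairs = [a + b for a, b in zip(word, word[1:])]
--     has_dup = any(p == q for i, p in enumerate(pairs) for q in pairs[i + 2:])
--     has_alt = any(a == b for a, b in zip(word, word[2:]))
--     return has_dup and has_alt
-- ===== Notes on version B (the rewrite author's own statement) =====
-- stated objective: alternative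
-- what changed: A's single stateful pass (growing seen-pair list plus a last_pair overlap toggle) is replaced by a memoryless declarative formulation: build the list of adjacent pairs once, then ask directly whether any pair recurs at distance >= 2 (brute-force any over enumerate/suffix) and whether any letter repeats one apart (zip); no seen-collection or toggle state at all.
-- crash fix: On words of length < 2 A raises IndexError (word[0]+word[1]); B's empty zips make both checks vacuously False, so B returns False. — e.g. on is_really_nice("a"): A raises IndexError, B returns false
import Mathlib
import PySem

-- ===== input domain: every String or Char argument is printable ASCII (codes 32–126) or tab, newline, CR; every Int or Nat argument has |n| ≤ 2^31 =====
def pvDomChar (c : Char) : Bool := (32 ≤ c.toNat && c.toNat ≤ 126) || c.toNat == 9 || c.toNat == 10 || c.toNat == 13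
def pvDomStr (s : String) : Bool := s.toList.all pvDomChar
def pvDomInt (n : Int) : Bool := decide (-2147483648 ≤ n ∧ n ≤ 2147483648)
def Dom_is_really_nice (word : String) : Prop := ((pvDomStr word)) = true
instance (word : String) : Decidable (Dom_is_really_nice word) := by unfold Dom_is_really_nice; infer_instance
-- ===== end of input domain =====

-- B replaces A's single stateful pass (seen-pair list + last_pair overlap toggle) by a memoryless
-- declarative check: build the adjacent-pair list once, then brute-force 'any pair recurs ≥ 2 later'
-- and 'any letter repeats one apart' (objective: alternative; not claimed faster).

-- ===== PORT A =====
-- the for-loop of A as structural recursion over the remaining characters;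
-- (p, a, b) is the window (word[index-1], word[index], word[index+1])
def isNiceLoopA (rest : List Char) (p a b : Char) (dup alt : Bool)
    (last : String) (pairs : List String) : Bool :=
  let cur := String.ofList [a, b]
  let dup' := if cur ∈ pairs then (if cur ≠ last then true else dup) else dup
  let pairs' := if cur ∈ pairs then pairs else pairs ++ [cur]
  let last' := if last ≠ cur then cur else ""
  let alt' := if p = b then true else alt
  match rest with
  | [] => dup' && alt'
  | c :: rest' => isNiceLoopA rest' a b c dup' alt' last' pairs'

def is_really_nice (word : String) : Bool :=
  match word.toList with
  | c0 :: c1 :: rest =>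
    let last := String.ofList [c0, c1]
    match rest with
    | [] => false && false
    | c2 :: rest' => isNiceLoopA rest' c0 c1 c2 false false last [last]
  | _ => false   -- len(word) < 2: word[0]/word[1] raises IndexError in Python, outside Pre_

-- ===== PORT B =====
-- Source B line by line: pairs = [a+b for a,b in zip(word, word[1:])];
-- has_dup = any(p == q for i,p in enumerate(pairs) for q in pairs[i+2:]);
-- has_alt = any(a == b for a,b in zip(word, word[2:])); return has_dup and has_alt
def is_really_nice_alt (word : String) : Bool :=
  let cs := word.toList
  let pairs := (cs.zip (PySem.List.slice cs (some 1) none)).map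
      (fun ab => String.ofList [ab.1, ab.2])
  let has_dup := (PySem.List.enumerate pairs 0).any
      (fun ip => (PySem.List.slice pairs (some (ip.1 + 2)) none).any (fun q => ip.2 == q))
  let has_alt := (cs.zip (PySem.List.slice cs (some 2) none)).any (fun ab => ab.1 == ab.2)
  has_dup && has_alt

-- ===== PRECONDITION & SPEC =====
-- Pre_ excludes only len(word) < 2, where A raises IndexError on word[0]/word[1].
def Pre_is_really_nice (word : String) : Prop := 2 ≤ word.toList.length
instance (word : String) : Decidable (Pre_is_really_nice word) := by
  unfold Pre_is_really_nice; infer_instance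
def pvWitness_is_really_nice : String := "xyxy"

-- On words of length < 2 A raises IndexError (word[0]+word[1]); B's empty zips make both
-- checks vacuously False, so B returns False.
def Raises_is_really_nice (word : String) : Prop := word.toList.length < 2
instance (word : String) : Decidable (Raises_is_really_nice word) := by
  unfold Raises_is_really_nice; infer_instance
def pvRaiseWitness_is_really_nice : String := "a"
def pvRaiseWitnessOut_is_really_nice : Bool := false

def Spec_is_really_nice (word : String) (out : Bool) : Prop := out = is_really_nice_alt word
instance (word : String) (out : Bool) : Decidable (Spec_is_really_nice word out) := by
  unfold Spec_is_really_nice; infer_instance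

-- ===== CLAIM (what is proved, stated in full; the proofs are below) =====
def Claim_equal_is_really_nice : Prop := ∀ (word : String), Dom_is_really_nice word →
  Pre_is_really_nice word → Spec_is_really_nice word (is_really_nice word)

def Claim_raises_is_really_nice : Prop :=
  (∀ (word : String), Dom_is_really_nice word → Raises_is_really_nice word →
    ¬ Pre_is_really_nice word) ∧
  (Dom_is_really_nice (pvRaiseWitness_is_really_nice) ∧
    Raises_is_really_nice (pvRaiseWitness_is_really_nice) ∧
    is_really_nice_alt (pvRaiseWitness_is_really_nice) = pvRaiseWitnessOut_is_really_nice)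

-- ===== LEMMAS AND PROOFS =====

-- 'some pair occurs at two indices ≥ 2 apart in the pair history hs'
def Edup (hs : List String) : Prop :=
  ∃ k j : Nat, k + 2 ≤ j ∧ ∃ p, hs[k]? = some p ∧ hs[j]? = some p

-- proof-side helper: the alternating scan of the remaining windows, short-circuiting
def isNiceAlt (rest : List Char) (a b c : Char) : Bool :=
  decide (a = c) ||
    match rest with
    | [] => false
    | d :: rest' => isNiceAlt rest' b c d

-- the pairs contributed by the rest of A's loop, window starting at (a, b)
def pairTrail : Char → Char → List Char → List String
  | a, b, [] => [String.ofList [a, b]]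
  | a, b, c :: r => String.ofList [a, b] :: pairTrail b c r

-- the loop invariant for A: hs is the history of pairs seen so far
def INV (hs : List String) (last : String) (pairs : List String) (dupA : Bool) : Prop :=
  (∀ p, p ∈ pairs ↔ p ∈ hs) ∧
  (dupA = true ↔ Edup hs) ∧
  ((last = "" ∧ 2 ≤ hs.length ∧ hs[hs.length - 1]? = hs[hs.length - 2]?) ∨
   (hs[hs.length - 1]? = some last ∧
     (hs.length = 1 ∨ hs[hs.length - 1]? ≠ hs[hs.length - 2]? ∨ Edup hs)))

theorem not_edup_singleton (x : String) : ¬ Edup [x] := by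
  rintro ⟨k, j, hkj, p, -, hj⟩
  obtain ⟨hjl, -⟩ := List.getElem?_eq_some_iff.mp hj
  simp only [List.length_cons, List.length_nil] at hjl
  omega

theorem ofList_pair_ne_empty (a b : Char) : String.ofList [a, b] ≠ "" := by
  intro h
  have := congrArg String.toList h
  simp at this

theorem getElem?_some_lt {α : Type} {l : List α} {k : Nat} {p : α}
    (h : l[k]? = some p) : k < l.length := by
  obtain ⟨h1, -⟩ := List.getElem?_eq_some_iff.mp h
  exact h1

theorem edup_append (hs : List String) (cur : String) :
    Edup (hs ++ [cur]) ↔ Edup hs ∨ ∃ k, k + 2 ≤ hs.length ∧ hs[k]? = some cur := by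
  constructor
  · rintro ⟨k, j, hkj, p, hk, hj⟩
    obtain ⟨hjlen, -⟩ := List.getElem?_eq_some_iff.mp hj
    simp only [List.length_append, List.length_cons, List.length_nil] at hjlen
    by_cases hjn : j < hs.length
    · left
      refine ⟨k, j, hkj, p, ?_, ?_⟩
      · rw [List.getElem?_append_left (by omega)] at hk; exact hk
      · rw [List.getElem?_append_left hjn] at hj; exact hj
    · have hje : j = hs.length := by omega
      subst hje
      have hcc : (hs ++ [cur])[hs.length]? = some cur := by simp
      rw [hcc] at hj
      obtain rfl : cur = p := by simpa using hj
      right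
      refine ⟨k, by omega, ?_⟩
      rw [List.getElem?_append_left (by omega)] at hk; exact hk
  · rintro (⟨k, j, hkj, p, hk, hj⟩ | ⟨k, hk2, hk⟩)
    · obtain ⟨hjlen, -⟩ := List.getElem?_eq_some_iff.mp hj
      refine ⟨k, j, hkj, p, ?_, ?_⟩
      · rw [List.getElem?_append_left (by omega)]; exact hk
      · rw [List.getElem?_append_left (by omega)]; exact hj
    · refine ⟨k, hs.length, by omega, cur, ?_, by simp⟩
      rw [List.getElem?_append_left (by omega)]; exact hk

theorem inv_len_pos {hs last pairs dupA} (h : INV hs last pairs dupA) :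
    1 ≤ hs.length := by
  rcases h.2.2 with ⟨-, h2, -⟩ | ⟨hl, -⟩
  · omega
  · by_contra hn
    have : hs = [] := by
      cases hs with
      | nil => rfl
      | cons x xs => simp at hn
    subst this
    simp at hl

theorem INV_step {hs : List String} {last : String} {pairs : List String} {dupA : Bool}
    (cur : String) (hcur : cur ≠ "")
    (h : INV hs last pairs dupA) :
    INV (hs ++ [cur])
      (if last ≠ cur then cur else "")
      (if cur ∈ pairs then pairs else pairs ++ [cur])
      (if cur ∈ pairs then (if cur ≠ last then true else dupA) else dupA) := by
  have hn1 : 1 ≤ hs.length := inv_len_pos h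
  obtain ⟨hpairs, hA, hlast⟩ := h
  have hconc : (hs ++ [cur])[hs.length]? = some cur := by simp
  refine ⟨?_, ?_, ?_⟩
  · -- pairs membership
    intro p
    by_cases hc : cur ∈ pairs
    · rw [if_pos hc]
      rw [hpairs p, List.mem_append, List.mem_singleton]
      constructor
      · exact Or.inl
      · rintro (hp | hpcur)
        · exact hp
        · rw [hpcur]; exact (hpairs cur).mp hc
    · rw [if_neg hc]
      rw [List.mem_append, List.mem_singleton, List.mem_append, List.mem_singleton, hpairs p]
  · -- dupA
    rw [edup_append]
    by_cases hc : cur ∈ pairs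
    · have hm : cur ∈ hs := (hpairs cur).mp hc
      by_cases hlc : cur ≠ last
      · rw [if_pos hc, if_pos hlc]
        simp only [true_iff]
        obtain ⟨k1, hk1⟩ := List.mem_iff_getElem?.mp hm
        have hk1lt : k1 < hs.length := getElem?_some_lt hk1
        by_cases hk1b : k1 + 2 ≤ hs.length
        · exact Or.inr ⟨k1, hk1b, hk1⟩
        · have hk1e : k1 = hs.length - 1 := by omega
          rw [hk1e] at hk1
          rcases hlast with ⟨hl0, hn2, heq⟩ | ⟨hsome, -⟩
          · refine Or.inr ⟨hs.length - 2, by omega, ?_⟩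
            rw [← heq]; exact hk1
          · rw [hk1] at hsome
            obtain rfl : cur = last := by simpa using hsome
            exact absurd rfl hlc
      · rw [if_pos hc, if_neg hlc]
        rw [not_not] at hlc
        subst hlc
        rw [hA]
        constructor
        · exact Or.inl
        · rintro (hd | ⟨k, hk2, hk⟩)
          · exact hd
          · rcases hlast with ⟨hl0, -, -⟩ | ⟨hsome, hdisj⟩
            · exact absurd hl0 hcur
            · rcases hdisj with hn1' | hne | hd
              · omega
              · have hkne : k ≠ hs.length - 2 := by
                  intro hke
                  apply hne
                  rw [hsome, ← hke]
                  exact hk.symm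
                exact ⟨k, hs.length - 1, by omega, cur, hk, hsome⟩
              · exact hd
    · rw [if_neg hc]
      have hnm : cur ∉ hs := fun hm => hc ((hpairs cur).mpr hm)
      rw [hA]
      constructor
      · exact Or.inl
      · rintro (hd | ⟨k, -, hk⟩)
        · exact hd
        · exact absurd (List.mem_iff_getElem?.mpr ⟨k, hk⟩) hnm
  · -- last'
    by_cases hlc : last ≠ cur
    · rw [if_pos hlc]
      right
      have hlen' : (hs ++ [cur]).length = hs.length + 1 := by simp
      constructor
      · rw [hlen']
        simp
      · by_cases hprev : hs[hs.length - 1]? = some cur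
        · rcases hlast with ⟨hl0, hn2, heq⟩ | ⟨hsome, -⟩
          · refine Or.inr (Or.inr ((edup_append hs cur).mpr (Or.inr ⟨hs.length - 2, by omega, ?_⟩)))
            rw [← heq]
            exact hprev
          · rw [hprev] at hsome
            have hcl : cur = last := by simpa using hsome
            exact absurd hcl.symm hlc
        · refine Or.inr (Or.inl ?_)
          rw [hlen']
          simp only [Nat.add_sub_cancel]
          rw [hconc]
          have hidx : (hs ++ [cur])[hs.length + 1 - 2]? = hs[hs.length - 1]? := by
            rw [show hs.length + 1 - 2 = hs.length - 1 from by omega]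
            exact List.getElem?_append_left (by omega)
          rw [hidx]
          exact fun hcon => hprev hcon.symm
    · rw [if_neg hlc]
      rw [not_not] at hlc
      subst hlc
      left
      have hlen' : (hs ++ [last]).length = hs.length + 1 := by simp
      refine ⟨rfl, by rw [hlen']; omega, ?_⟩
      rw [hlen']
      simp only [Nat.add_sub_cancel]
      rw [hconc]
      have hidx : (hs ++ [last])[hs.length + 1 - 2]? = hs[hs.length - 1]? := by
        rw [show hs.length + 1 - 2 = hs.length - 1 from by omega]
        exact List.getElem?_append_left (by omega)
      rw [hidx]
      rcases hlast with ⟨hl0, -, -⟩ | ⟨hsome, -⟩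
      · exact absurd hl0 hcur
      · rw [hsome]

-- A's loop computes exactly 'Edup of the full pair history, AND the alternating scan'
theorem loopA_eq : ∀ (rest : List Char) (p a b : Char) (hs : List String)
    (last : String) (pairs : List String) (dupA alt : Bool),
    INV hs last pairs dupA →
    (isNiceLoopA rest p a b dupA alt last pairs = true ↔
      (Edup (hs ++ pairTrail a b rest) ∧ (alt = true ∨ isNiceAlt rest p a b = true))) := by
  intro rest
  induction rest with
  | nil =>
    intro p a b hs last pairs dupA alt h
    have hstep := INV_step (String.ofList [a, b]) (ofList_pair_ne_empty a b) h
    obtain ⟨-, h4, -⟩ := hstep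
    simp only [isNiceLoopA, isNiceAlt, pairTrail, Bool.and_eq_true]
    rw [h4]
    by_cases hpb : p = b <;> cases alt <;> simp [hpb]
  | cons c rest' ih =>
    intro p a b hs last pairs dupA alt h
    have hstep := INV_step (String.ofList [a, b]) (ofList_pair_ne_empty a b) h
    simp only [isNiceLoopA]
    rw [ih a b c (hs ++ [String.ofList [a, b]]) _ _ _ _ hstep]
    have happ : hs ++ pairTrail a b (c :: rest')
        = (hs ++ [String.ofList [a, b]]) ++ pairTrail b c rest' := by
      simp [pairTrail]
    rw [happ]
    simp only [isNiceAlt]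
    by_cases hpb : p = b <;> cases alt <;> simp [hpb]

theorem inv_init (c0 c1 : Char) :
    INV [String.ofList [c0, c1]] (String.ofList [c0, c1]) [String.ofList [c0, c1]] false := by
  refine ⟨fun p => Iff.rfl, ?_, ?_⟩
  · simpa using (not_edup_singleton (String.ofList [c0, c1]))
  · right
    exact ⟨by simp, Or.inl rfl⟩

-- B's pair-list equals A's pair history
theorem zip_pairs_eq : ∀ (rest : List Char) (a b : Char),
    ((a :: b :: rest).zip (b :: rest)).map (fun ab => String.ofList [ab.1, ab.2])
      = pairTrail a b rest := by
  intro rest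
  induction rest with
  | nil => intro a b; simp [pairTrail]
  | cons c r ih =>
    intro a b
    simp only [List.zip_cons_cons, List.map_cons, pairTrail]
    rw [← ih b c]
    rfl

-- B's brute-force dup check is Edup
theorem dup_any_iff (pairs : List String) :
    ((PySem.List.enumerate pairs 0).any
      (fun ip => (PySem.List.slice pairs (some (ip.1 + 2)) none).any (fun q => ip.2 == q)) = true)
    ↔ Edup pairs := by
  rw [List.any_eq_true]
  constructor
  · rintro ⟨ip, hmem, hany⟩
    obtain ⟨k, hk, rfl⟩ := (PySem.List.mem_enumerate_iff _ _ _).mp hmem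
    simp only [zero_add] at hany
    have hcast : ((k : Int) + 2) = ((k + 2 : Nat) : Int) := by push_cast; ring
    rw [hcast, PySem.List.slice_from_natCast] at hany
    obtain ⟨q, hqmem, hq⟩ := List.any_eq_true.mp hany
    obtain ⟨m, hm, hqe⟩ := List.mem_iff_getElem.mp hqmem
    rw [List.length_drop] at hm
    rw [List.getElem_drop] at hqe
    have hq' : pairs[k] = q := by simpa using hq
    refine ⟨k, k + 2 + m, by omega, q, ?_, ?_⟩
    · rw [List.getElem?_eq_getElem hk, hq']
    · rw [List.getElem?_eq_getElem (by omega), hqe]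
  · rintro ⟨k, j, hkj, p, hk, hj⟩
    have hklt : k < pairs.length := getElem?_some_lt hk
    have hjlt : j < pairs.length := getElem?_some_lt hj
    refine ⟨((k : Int), pairs[k]), (PySem.List.mem_enumerate_iff _ _ _).mpr ⟨k, hklt, by simp⟩, ?_⟩
    
    have hcast : ((k : Int) + 2) = ((k + 2 : Nat) : Int) := by push_cast; ring
    rw [hcast, PySem.List.slice_from_natCast]
    apply List.any_eq_true.mpr
    refine ⟨p, ?_, ?_⟩
    · apply List.mem_iff_getElem.mpr
      refine ⟨j - (k + 2), by simp; omega, ?_⟩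
      rw [List.getElem_drop]
      have hidx : k + 2 + (j - (k + 2)) = j := by omega
      rw [List.getElem?_eq_getElem hjlt] at hj
      simp only [hidx]
      exact Option.some.inj hj
    · rw [List.getElem?_eq_getElem hklt] at hk
      have := Option.some.inj hk
      simp [this]

-- B's alternating zip-any is A's alternating scan
theorem alt_zip_eq : ∀ (rest : List Char) (a b c : Char),
    isNiceAlt rest a b c
      = ((a :: b :: c :: rest).zip (c :: rest)).any (fun ab => decide (ab.1 = ab.2)) := by
  intro rest
  induction rest with
  | nil => intro a b c; simp [isNiceAlt]
  | cons d r ih =>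
    intro a b c
    simp only [isNiceAlt, List.zip_cons_cons, List.any_cons]
    rw [ih b c d]
    simp

-- ===== VERDICT (by name: the statement is the Claim_ definition above) =====
theorem is_really_nice_spec : Claim_equal_is_really_nice := by
  intro word _hdom hpre
  unfold Pre_is_really_nice at hpre
  unfold Spec_is_really_nice is_really_nice is_really_nice_alt
  cases hW : word.toList with
  | nil => rw [hW] at hpre; simp at hpre
  | cons c0 t =>
    cases t with
    | nil => rw [hW] at hpre; simp at hpre
    | cons c1 rest =>
      cases rest with
      | nil =>
        simp only [PySem.List.slice_from_one, List.tail_cons]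
        rw [show ((2 : Int)) = ((2 : Nat) : Int) from by norm_num,
          PySem.List.slice_from_natCast]
        simp [PySem.List.enumerate,
          show ((0 : Int) + 2) = ((2 : Nat) : Int) from by norm_num]
      | cons c2 rest' =>
        simp only [PySem.List.slice_from_one, List.tail_cons]
        have hs2 : PySem.List.slice (c0 :: c1 :: c2 :: rest') (some 2) none = c2 :: rest' := by
          rw [show ((2 : Int)) = ((2 : Nat) : Int) from by norm_num,
            PySem.List.slice_from_natCast]
          rfl
        rw [hs2, zip_pairs_eq (c2 :: rest') c0 c1]
        rw [Bool.eq_iff_iff, Bool.and_eq_true]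
        rw [loopA_eq rest' c0 c1 c2 [String.ofList [c0, c1]] _ _ _ _ (inv_init c0 c1)]
        rw [dup_any_iff]
        rw [show pairTrail c0 c1 (c2 :: rest')
            = [String.ofList [c0, c1]] ++ pairTrail c1 c2 rest' from rfl] at *
        constructor
        · rintro ⟨hd, halt⟩
          refine ⟨hd, ?_⟩
          rcases halt with h | h
          · simp at h
          · rw [alt_zip_eq] at h
            simpa using h
        · rintro ⟨hd, halt⟩
          refine ⟨hd, Or.inr ?_⟩
          rw [alt_zip_eq]
          simpa using halt

@[simp] theorem is_really_nice_raises : Claim_raises_is_really_nice := by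
  unfold Claim_raises_is_really_nice
  constructor
  · intro word _ hr
    unfold Raises_is_really_nice at hr
    unfold Pre_is_really_nice
    omega
  · exact ⟨by decide, by decide, by decide⟩
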